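-- pv_equiv track=rewrite | github.com/pkout/coding-exercises | CrackingTheCodingInterview/sum_bin_tree_nodes.py | sum_tree_nodes_loop
-- ===== SOURCE A (Python) =====
-- def sum_tree_nodes_loop(tree, node):
--     total = node
--     nodes = [node]
--
--     while len(nodes) > 0:
--         curr_node = nodes.pop(0)
--
--         if curr_node not in tree:
--             continue
--
--         sub_nodes = tree[curr_node]
--
--         if len(sub_nodes) > 0:
--             total += sub_nodes[0]
--             nodes.append(sub_nodes[0])
--
--         if len(sub_nodes) > 1:
--             total += sub_nodes[1]
--             nodes.append(sub_nodes[1])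
--
--     return total
-- ===== SOURCE B (Python) =====
-- def sum_tree_nodes_loop(tree, node):
--     total = node
--     if node in tree:
--         children = tree[node]
--         if len(children) > 0:
--             total += sum_tree_nodes_loop(tree, children[0])
--         if len(children) > 1:
--             total += sum_tree_nodes_loop(tree, children[1])
--     return total
-- ===== Notes on version B (the rewrite author's own statement) =====
-- stated objective: simpler
-- what changed: Replaces the explicit FIFO queue (pop(0)/append BFS) by direct structural recursion (DFS) over the first two children; since neither version keeps a visited set the multiset of visited nodes is the same and so is the sum. Pre_ excludes exactly the inputs on which A never returns: those where a cycle of the first-two-children edge relation is reachable from the start node, making A's while-loop infinite; every input on which A returns a value satisfies Pre_ and is covered by the equivalence.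
import Mathlib
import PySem

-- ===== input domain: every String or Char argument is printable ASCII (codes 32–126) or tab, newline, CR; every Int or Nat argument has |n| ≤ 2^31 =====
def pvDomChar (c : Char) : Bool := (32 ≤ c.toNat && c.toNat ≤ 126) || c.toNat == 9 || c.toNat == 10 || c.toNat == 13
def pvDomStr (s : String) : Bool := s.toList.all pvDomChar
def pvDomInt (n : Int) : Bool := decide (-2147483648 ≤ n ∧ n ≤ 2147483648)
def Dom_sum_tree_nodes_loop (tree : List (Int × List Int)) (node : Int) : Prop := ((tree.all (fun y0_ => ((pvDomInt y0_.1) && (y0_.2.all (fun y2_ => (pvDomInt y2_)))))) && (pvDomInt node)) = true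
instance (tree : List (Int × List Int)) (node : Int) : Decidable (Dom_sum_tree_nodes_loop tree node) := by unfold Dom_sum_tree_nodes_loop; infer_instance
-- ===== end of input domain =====

-- B replaces A's explicit FIFO queue (with its linear-time pop(0)) by direct structural
-- recursion over the first two children; same return value on every admitted input.

-- ===== shared graph helpers (used by the ports' fuel bound and by Pre_; not by Spec_) =====
-- the first-two-children edge relation of the dict, and its decidable reachability closure
def pvKids (tree : List (Int × List Int)) (x : Int) : List Int :=
  ((tree.lookup x).getD []).take 2

def pvAllKids (tree : List (Int × List Int)) : List Int :=
  tree.flatMap (fun p => p.2.take 2)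

def pvAddNew (S : List Int) (x : Int) : List Int := if x ∈ S then S else S ++ [x]

def pvStep (tree : List (Int × List Int)) (S : List Int) : List Int :=
  (S.flatMap (pvKids tree)).foldl pvAddNew S

def pvCl (tree : List (Int × List Int)) : Nat → List Int → List Int
  | 0, S => S
  | n + 1, S => pvStep tree (pvCl tree n S)

-- all nodes reachable from `node` (fuel |pvAllKids|+1 provably reaches the fixpoint)
def pvReach (tree : List (Int × List Int)) (node : Int) : List Int :=
  pvCl tree ((pvAllKids tree).length + 1) [node]

-- all strict descendants of q (closure from q's first-two children)
def pvDesc (tree : List (Int × List Int)) (q : Int) : List Int :=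
  pvCl tree ((pvAllKids tree).length + 1) (List.foldl pvAddNew [] (pvKids tree q))

-- ===== PORT A =====
-- the while-loop, fueled: each pop consumes one unit of fuel; under Pre_ the fuel
-- 3 ^ (|pvAllKids tree| + 1) is proved sufficient, so the 0-fuel branch is never reached.
def pvBfsA (tree : List (Int × List Int)) : Nat → Int → List Int → Int
  | 0, total, _ => total
  | _ + 1, total, [] => total
  | fuel + 1, total, curr :: rest =>
    match tree.lookup curr with                       -- 'curr_node not in tree' / 'tree[curr_node]'
    | none => pvBfsA tree fuel total rest             -- continue
    | some subs =>
      match subs with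
      | [] => pvBfsA tree fuel total rest
      | [a] => pvBfsA tree fuel (total + a) (rest ++ [a])                 -- len(sub_nodes) == 1
      | a :: b :: _ => pvBfsA tree fuel (total + a + b) (rest ++ [a, b])  -- len(sub_nodes) > 1

def sum_tree_nodes_loop (tree : List (Int × List Int)) (node : Int) : Int :=
  pvBfsA tree (3 ^ ((pvAllKids tree).length + 1)) node [node]   -- total = node; nodes = [node]

-- ===== PORT B =====
-- the recursion of Source B, fueled by |pvAllKids tree| + 1 (proved sufficient under Pre_).
def pvDfsB (tree : List (Int × List Int)) : Nat → Int → Int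
  | 0, node => node
  | fuel + 1, node =>
    match tree.lookup node with                       -- 'node in tree' / 'tree[node]'
    | none => node
    | some cs =>
      match cs with
      | [] => node
      | [a] => node + pvDfsB tree fuel a
      | a :: b :: _ => node + pvDfsB tree fuel a + pvDfsB tree fuel b

def sum_tree_nodes_loop_alt (tree : List (Int × List Int)) (node : Int) : Int :=
  pvDfsB tree ((pvAllKids tree).length + 1) node

-- ===== PRECONDITION & SPEC =====
-- Pre_ says exactly: no cycle of the first-two-children edge relation is reachable from the
-- start node.  On precisely these inputs A's while-loop terminates; on the excluded inputs A
-- loops forever (returns nothing), so no input on which A returns a value is excluded.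
def Pre_sum_tree_nodes_loop (tree : List (Int × List Int)) (node : Int) : Prop :=
  ∀ q ∈ pvReach tree node, q ∉ pvDesc tree q
instance (tree : List (Int × List Int)) (node : Int) : Decidable (Pre_sum_tree_nodes_loop tree node) := by
  unfold Pre_sum_tree_nodes_loop; infer_instance

def pvWitness_sum_tree_nodes_loop : (List (Int × List Int)) × Int :=
  ([(1, [2, 3]), (2, [4]), (3, []), (4, [])], 1)

def Spec_sum_tree_nodes_loop (tree : List (Int × List Int)) (node : Int) (out : Int) : Prop := out = sum_tree_nodes_loop_alt tree node
instance (tree : List (Int × List Int)) (node : Int) (out : Int) : Decidable (Spec_sum_tree_nodes_loop tree node out) := by unfold Spec_sum_tree_nodes_loop; infer_instance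

-- ===== CLAIM (what is proved, stated in full; the proofs are below) =====
def Claim_equal_sum_tree_nodes_loop : Prop := ∀ (tree : List (Int × List Int)) (node : Int), Dom_sum_tree_nodes_loop tree node → Pre_sum_tree_nodes_loop tree node → Spec_sum_tree_nodes_loop tree node (sum_tree_nodes_loop tree node)

-- ===== LEMMAS AND PROOFS =====

-- membership / prefix / nodup facts about the fold that adds new elements
lemma pv_mem_foldl_addNew (L : List Int) : ∀ (S : List Int) (x : Int),
    x ∈ L.foldl pvAddNew S ↔ x ∈ S ∨ x ∈ L := by
  induction L with
  | nil => intro S x; simp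
  | cons a L ih =>
    intro S x
    have hmem : x ∈ pvAddNew S a ↔ x ∈ S ∨ x = a := by
      unfold pvAddNew; split_ifs with h
      · constructor
        · exact Or.inl
        · rintro (hx | rfl) <;> [exact hx; exact h]
      · simp
    simp only [List.foldl_cons, ih, hmem, List.mem_cons]
    tauto

lemma pv_prefix_foldl_addNew (L : List Int) : ∀ (S : List Int), S <+: L.foldl pvAddNew S := by
  induction L with
  | nil => intro S; simp
  | cons a L ih =>
    intro S
    have h1 : S <+: pvAddNew S a := by
      unfold pvAddNew; split_ifs
      · exact List.prefix_refl S
      · exact List.prefix_append S [a]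
    exact h1.trans (ih (pvAddNew S a))

lemma pv_nodup_foldl_addNew (L : List Int) : ∀ (S : List Int), S.Nodup → (L.foldl pvAddNew S).Nodup := by
  induction L with
  | nil => intro S h; simpa using h
  | cons a L ih =>
    intro S hS
    apply ih
    unfold pvAddNew; split_ifs with h
    · exact hS
    · refine hS.append (List.nodup_singleton a) ?_
      intro b hb hb2
      simp only [List.mem_singleton] at hb2
      subst hb2
      exact h hb

lemma pv_mem_step (tree : List (Int × List Int)) (S : List Int) (x : Int) :
    x ∈ pvStep tree S ↔ x ∈ S ∨ ∃ q ∈ S, x ∈ pvKids tree q := by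
  unfold pvStep
  rw [pv_mem_foldl_addNew]
  simp [List.mem_flatMap]

lemma pv_subset_step (tree : List (Int × List Int)) (S : List Int) : S ⊆ pvStep tree S :=
  (pv_prefix_foldl_addNew _ S).subset

lemma pv_nodup_step (tree : List (Int × List Int)) (S : List Int) (h : S.Nodup) :
    (pvStep tree S).Nodup := pv_nodup_foldl_addNew _ S h

lemma pv_kids_subset_step (tree : List (Int × List Int)) {S : List Int} {q : Int}
    (hq : q ∈ S) : pvKids tree q ⊆ pvStep tree S := by
  intro x hx
  exact (pv_mem_step tree S x).mpr (Or.inr ⟨q, hq, hx⟩)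

lemma pv_subset_cl (tree : List (Int × List Int)) (n : Nat) (S : List Int) : S ⊆ pvCl tree n S := by
  induction n with
  | zero => simp [pvCl]
  | succ n ih => exact ih.trans (pv_subset_step tree _)

lemma pv_nodup_cl (tree : List (Int × List Int)) (n : Nat) (S : List Int) (h : S.Nodup) :
    (pvCl tree n S).Nodup := by
  induction n with
  | zero => simpa [pvCl]
  | succ n ih => exact pv_nodup_step tree _ ih

lemma pv_cl_subset_closed (tree : List (Int × List Int)) (n : Nat) {S T : List Int}
    (hS : S ⊆ T) (hT : ∀ x ∈ T, pvKids tree x ⊆ T) : pvCl tree n S ⊆ T := by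
  induction n with
  | zero => simpa [pvCl]
  | succ n ih =>
    intro x hx
    rcases (pv_mem_step tree _ x).mp hx with hx | ⟨q, hq, hx⟩
    · exact ih hx
    · exact hT q (ih hq) hx

lemma pv_kids_subset_allKids (tree : List (Int × List Int)) (x : Int) :
    pvKids tree x ⊆ pvAllKids tree := by
  induction tree with
  | nil => simp [pvKids, pvAllKids, List.lookup]
  | cons p t ih =>
    obtain ⟨k, v⟩ := p
    by_cases h : k = x
    · subst h
      simp [pvKids, pvAllKids, List.lookup]
    · have hk : (k == x) = false := by simp [h]
      have hk' : (x == k) = false := by simp [Ne.symm h]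
      have h1 : pvKids ((k, v) :: t) x = pvKids t x := by
        simp [pvKids, List.lookup, hk']
      rw [h1]
      intro y hy
      simp only [pvAllKids, List.flatMap_cons, List.mem_append]
      exact Or.inr (ih hy)

-- a nodup list contained in another is at most as long (strictly shorter with a missing element)
lemma pv_nodup_length_le {l m : List Int} (hl : l.Nodup) (h : l ⊆ m) : l.length ≤ m.length :=
  (hl.subperm h).length_le

-- prefix growth: one step either fixes the set or strictly lengthens it
lemma pv_cl_grow (tree : List (Int × List Int)) (S : List Int) :
    ∀ n : Nat, pvStep tree (pvCl tree n S) = pvCl tree n S ∨ n + S.length ≤ (pvCl tree n S).length := by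
  intro n
  induction n with
  | zero => right; simp [pvCl]
  | succ n ih =>
    by_cases hf : pvStep tree (pvCl tree n S) = pvCl tree n S
    · left
      have : pvCl tree (n + 1) S = pvCl tree n S := hf
      rw [this, hf]
    · rcases ih with h | h
      · exact absurd h hf
      · right
        have hpre : pvCl tree n S <+: pvStep tree (pvCl tree n S) :=
          pv_prefix_foldl_addNew _ _
        have hlt : (pvCl tree n S).length < (pvStep tree (pvCl tree n S)).length := by
          rcases lt_or_eq_of_le hpre.length_le with h' | h'
          · exact h'
          · exact absurd (hpre.eq_of_length h').symm hf
        have : pvCl tree (n + 1) S = pvStep tree (pvCl tree n S) := rfl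
        rw [this]
        omega

-- with fuel |pvAllKids|+1 the closure is a fixpoint
lemma pv_cl_fix (tree : List (Int × List Int)) (S : List Int) (hS : S.Nodup) :
    pvStep tree (pvCl tree ((pvAllKids tree).length + 1) S) = pvCl tree ((pvAllKids tree).length + 1) S := by
  set n := (pvAllKids tree).length + 1 with hn
  rcases pv_cl_grow tree S n with h | h
  · exact h
  · exfalso
    have hsub : pvCl tree n S ⊆ S ++ pvAllKids tree := by
      apply pv_cl_subset_closed tree n
      · exact List.subset_append_left S _
      · intro x _ y hy
        exact List.mem_append_right S (pv_kids_subset_allKids tree x hy)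
    have hnd : (pvCl tree n S).Nodup := pv_nodup_cl tree n S hS
    have := pv_nodup_length_le hnd hsub
    simp only [List.length_append] at this
    omega

lemma pv_node_mem_reach (tree : List (Int × List Int)) (node : Int) :
    node ∈ pvReach tree node :=
  pv_subset_cl tree _ [node] (by simp)

lemma pv_reach_closed (tree : List (Int × List Int)) (node : Int) {q : Int}
    (hq : q ∈ pvReach tree node) : pvKids tree q ⊆ pvReach tree node := by
  have hfix := pv_cl_fix tree [node] (by simp)
  intro x hx
  have : x ∈ pvStep tree (pvReach tree node) := pv_kids_subset_step tree hq hx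
  rwa [show pvStep tree (pvReach tree node) = pvReach tree node from hfix] at this

lemma pv_desc_nodup (tree : List (Int × List Int)) (q : Int) : (pvDesc tree q).Nodup :=
  pv_nodup_cl tree _ _ (pv_nodup_foldl_addNew _ [] (by simp))

lemma pv_desc_closed (tree : List (Int × List Int)) (q : Int) {x : Int}
    (hx : x ∈ pvDesc tree q) : pvKids tree x ⊆ pvDesc tree q := by
  have hfix := pv_cl_fix tree (List.foldl pvAddNew [] (pvKids tree q))
    (pv_nodup_foldl_addNew _ [] (by simp))
  intro y hy
  have : y ∈ pvStep tree (pvDesc tree q) := pv_kids_subset_step tree hx hy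
  rwa [show pvStep tree (pvDesc tree q) = pvDesc tree q from hfix] at this

lemma pv_kids_mem_desc (tree : List (Int × List Int)) {q c : Int}
    (hc : c ∈ pvKids tree q) : c ∈ pvDesc tree q := by
  apply pv_subset_cl tree _ _
  rw [pv_mem_foldl_addNew]
  exact Or.inr hc

lemma pv_desc_mono (tree : List (Int × List Int)) {q c : Int}
    (hc : c ∈ pvKids tree q) : pvDesc tree c ⊆ pvDesc tree q := by
  apply pv_cl_subset_closed tree
  · intro x hx
    rw [pv_mem_foldl_addNew] at hx
    rcases hx with hx | hx
    · simp at hx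
    · exact pv_desc_closed tree q (pv_kids_mem_desc tree hc) hx
  · intro x hx
    exact pv_desc_closed tree q hx

-- rank of a node: number of distinct strict descendants; children of reachable nodes rank lower
def pvRank (tree : List (Int × List Int)) (q : Int) : Nat := (pvDesc tree q).length

lemma pv_rank_le (tree : List (Int × List Int)) (q : Int) :
    pvRank tree q ≤ (pvAllKids tree).length := by
  apply pv_nodup_length_le (pv_desc_nodup tree q)
  apply pv_cl_subset_closed tree
  · intro x hx
    rw [pv_mem_foldl_addNew] at hx
    rcases hx with hx | hx
    · simp at hx
    · exact pv_kids_subset_allKids tree q hx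
  · intro x _
    exact pv_kids_subset_allKids tree x

lemma pv_rank_lt (tree : List (Int × List Int)) (node : Int)
    (hpre : Pre_sum_tree_nodes_loop tree node) {q c : Int}
    (hq : q ∈ pvReach tree node) (hc : c ∈ pvKids tree q) :
    pvRank tree c < pvRank tree q := by
  have hcr : c ∈ pvReach tree node := pv_reach_closed tree node hq hc
  have hnc : c ∉ pvDesc tree c := hpre c hcr
  have hsub : pvDesc tree c ++ [c] ⊆ pvDesc tree q := by
    intro x hx
    rcases List.mem_append.mp hx with hx | hx
    · exact pv_desc_mono tree hc hx
    · simp at hx; subst hx; exact pv_kids_mem_desc tree hc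
  have hnd : (pvDesc tree c ++ [c]).Nodup := by
    refine (pv_desc_nodup tree c).append (List.nodup_singleton c) ?_
    intro y hy hy2
    simp only [List.mem_singleton] at hy2
    subst hy2
    exact hnc hy
  have := pv_nodup_length_le hnd hsub
  simp only [List.length_append, List.length_cons, List.length_nil] at this
  unfold pvRank
  omega

-- membership of the looked-up children in pvKids
lemma pv_lookup_kids_one (tree : List (Int × List Int)) {x a : Int} {rest : List Int}
    (h : tree.lookup x = some (a :: rest)) : a ∈ pvKids tree x := by
  simp [pvKids, h]

lemma pv_lookup_kids_two (tree : List (Int × List Int)) {x a b : Int} {rest : List Int}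
    (h : tree.lookup x = some (a :: b :: rest)) : b ∈ pvKids tree x := by
  simp [pvKids, h]

-- fuel invariance of the DFS on reachable nodes under Pre_
lemma pv_dfs_fuel (tree : List (Int × List Int)) (node : Int)
    (hpre : Pre_sum_tree_nodes_loop tree node) :
    ∀ k₁ k₂ x, x ∈ pvReach tree node → pvRank tree x < k₁ → pvRank tree x < k₂ →
      pvDfsB tree k₁ x = pvDfsB tree k₂ x := by
  intro k₁
  induction k₁ with
  | zero => intro k₂ x _ h1 _; omega
  | succ k ih =>
    intro k₂ x hx h1 h2
    obtain ⟨k₂', rfl⟩ : ∃ m, k₂ = m + 1 := ⟨k₂ - 1, by omega⟩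
    cases hL : tree.lookup x with
    | none => simp [pvDfsB, hL]
    | some cs =>
      match cs with
      | [] => simp [pvDfsB, hL]
      | [a] =>
        have hca := pv_lookup_kids_one tree hL
        have hra := pv_rank_lt tree node hpre hx hca
        have har : a ∈ pvReach tree node := pv_reach_closed tree node hx hca
        simp only [pvDfsB, hL]
        rw [ih k₂' a har (by omega) (by omega)]
      | a :: b :: rest =>
        have hca := pv_lookup_kids_one tree hL
        have hcb := pv_lookup_kids_two tree hL
        have hra := pv_rank_lt tree node hpre hx hca
        have hrb := pv_rank_lt tree node hpre hx hcb
        have har : a ∈ pvReach tree node := pv_reach_closed tree node hx hca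
        have hbr : b ∈ pvReach tree node := pv_reach_closed tree node hx hcb
        simp only [pvDfsB, hL]
        rw [ih k₂' a har (by omega) (by omega), ih k₂' b hbr (by omega) (by omega)]

-- one-step unfolding of the fueled DFS
lemma pvDfsB_succ (tree : List (Int × List Int)) (fuel : Nat) (x : Int) :
    pvDfsB tree (fuel + 1) x =
      match tree.lookup x with
      | none => x
      | some [] => x
      | some [a] => x + pvDfsB tree fuel a
      | some (a :: b :: _) => x + pvDfsB tree fuel a + pvDfsB tree fuel b := by
  cases hL : tree.lookup x with
  | none => simp [pvDfsB, hL]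
  | some cs =>
    match cs with
    | [] => simp [pvDfsB, hL]
    | [a] => simp [pvDfsB, hL]
    | a :: b :: rest => simp [pvDfsB, hL]

-- unfolding B's port at each shape of the looked-up entry
lemma pv_alt_stop (tree : List (Int × List Int)) (x : Int)
    (h : tree.lookup x = none ∨ tree.lookup x = some []) :
    sum_tree_nodes_loop_alt tree x = x := by
  unfold sum_tree_nodes_loop_alt
  rw [pvDfsB_succ]
  rcases h with h | h <;> rw [h]

lemma pv_alt_one (tree : List (Int × List Int)) (node : Int)
    (hpre : Pre_sum_tree_nodes_loop tree node) {x a : Int}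
    (hx : x ∈ pvReach tree node) (hL : tree.lookup x = some [a]) :
    sum_tree_nodes_loop_alt tree x = x + sum_tree_nodes_loop_alt tree a := by
  have hca := pv_lookup_kids_one tree hL
  have hra := pv_rank_lt tree node hpre hx hca
  have hxle := pv_rank_le tree x
  have har : a ∈ pvReach tree node := pv_reach_closed tree node hx hca
  unfold sum_tree_nodes_loop_alt
  rw [pvDfsB_succ, hL]
  dsimp only
  rw [pv_dfs_fuel tree node hpre (pvAllKids tree).length ((pvAllKids tree).length + 1) a har
    (by omega) (by omega)]

lemma pv_alt_two (tree : List (Int × List Int)) (node : Int)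
    (hpre : Pre_sum_tree_nodes_loop tree node) {x a b : Int} {rest : List Int}
    (hx : x ∈ pvReach tree node) (hL : tree.lookup x = some (a :: b :: rest)) :
    sum_tree_nodes_loop_alt tree x
      = x + sum_tree_nodes_loop_alt tree a + sum_tree_nodes_loop_alt tree b := by
  have hca := pv_lookup_kids_one tree hL
  have hcb := pv_lookup_kids_two tree hL
  have hra := pv_rank_lt tree node hpre hx hca
  have hrb := pv_rank_lt tree node hpre hx hcb
  have hxle := pv_rank_le tree x
  have har : a ∈ pvReach tree node := pv_reach_closed tree node hx hca
  have hbr : b ∈ pvReach tree node := pv_reach_closed tree node hx hcb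
  unfold sum_tree_nodes_loop_alt
  rw [pvDfsB_succ, hL]
  dsimp only
  rw [pv_dfs_fuel tree node hpre (pvAllKids tree).length ((pvAllKids tree).length + 1) a har
        (by omega) (by omega),
      pv_dfs_fuel tree node hpre (pvAllKids tree).length ((pvAllKids tree).length + 1) b hbr
        (by omega) (by omega)]

-- fuel weight of a queue: each element q costs 3^(rank q + 1)
def pvS (tree : List (Int × List Int)) (qs : List Int) : Nat :=
  (qs.map (fun q => 3 ^ (pvRank tree q + 1))).sum

-- pending contribution of a queue: each element q still owes (DFS-sum q) - q
def pvG (tree : List (Int × List Int)) (qs : List Int) : Int :=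
  (qs.map (fun q => sum_tree_nodes_loop_alt tree q - q)).sum

-- the BFS loop invariant: with enough fuel and a reachable queue, the loop
-- adds exactly the pending contributions
lemma pv_bfs_inv (tree : List (Int × List Int)) (node : Int)
    (hpre : Pre_sum_tree_nodes_loop tree node) :
    ∀ fuel (queue : List Int) (total : Int),
      (∀ q ∈ queue, q ∈ pvReach tree node) → pvS tree queue ≤ fuel →
      pvBfsA tree fuel total queue = total + pvG tree queue := by
  intro fuel
  induction fuel with
  | zero =>
    intro queue total _ hS
    cases queue with
    | nil => simp [pvBfsA, pvG]
    | cons q qs =>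
      exfalso
      have h1 : 1 ≤ 3 ^ (pvRank tree q + 1) := Nat.one_le_pow _ _ (by omega)
      have hSq : pvS tree (q :: qs) = 3 ^ (pvRank tree q + 1) + pvS tree qs := by
        simp [pvS]
      omega
  | succ fuel ih =>
    intro queue total hmem hS
    cases queue with
    | nil => simp [pvBfsA, pvG]
    | cons q qs =>
      have hqr : q ∈ pvReach tree node := hmem q (by simp)
      have hmem' : ∀ x ∈ qs, x ∈ pvReach tree node := fun x hx => hmem x (by simp [hx])
      have hSq : pvS tree (q :: qs) = 3 ^ (pvRank tree q + 1) + pvS tree qs := by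
        simp [pvS]
      have hGq : pvG tree (q :: qs) = (sum_tree_nodes_loop_alt tree q - q) + pvG tree qs := by
        simp [pvG]
      cases hL : tree.lookup q with
      | none =>
        have h1 : 1 ≤ 3 ^ (pvRank tree q + 1) := Nat.one_le_pow _ _ (by omega)
        have := ih qs total hmem' (by omega)
        simp only [pvBfsA, hL, this]
        rw [hGq, pv_alt_stop tree q (Or.inl hL)]
        ring
      | some cs =>
        have hpow : 3 ^ (pvRank tree q + 1) = 3 * 3 ^ (pvRank tree q) := by
          rw [pow_succ]; ring
        match cs with
        | [] =>
          have h1 : 1 ≤ 3 ^ (pvRank tree q + 1) := Nat.one_le_pow _ _ (by omega)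
          have := ih qs total hmem' (by omega)
          simp only [pvBfsA, hL, this]
          rw [hGq, pv_alt_stop tree q (Or.inr hL)]
          ring
        | [a] =>
          have hca := pv_lookup_kids_one tree hL
          have hra := pv_rank_lt tree node hpre hqr hca
          have har : a ∈ pvReach tree node := pv_reach_closed tree node hqr hca
          have hpa : 3 ^ (pvRank tree a + 1) ≤ 3 ^ (pvRank tree q) :=
            Nat.pow_le_pow_right (by omega) (by omega)
          have h3 : 1 ≤ 3 ^ (pvRank tree q) := Nat.one_le_pow _ _ (by omega)
          have hmem'' : ∀ x ∈ qs ++ [a], x ∈ pvReach tree node := by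
            intro x hx
            rcases List.mem_append.mp hx with hx | hx
            · exact hmem' x hx
            · simp at hx; subst hx; exact har
          have hS' : pvS tree (qs ++ [a]) ≤ fuel := by
            simp only [pvS, List.map_append, List.sum_append, List.map_cons, List.map_nil,
              List.sum_cons, List.sum_nil] at hS hSq ⊢
            omega
          have := ih (qs ++ [a]) (total + a) hmem'' hS'
          simp only [pvBfsA, hL, this]
          have hGapp : pvG tree (qs ++ [a]) = pvG tree qs + (sum_tree_nodes_loop_alt tree a - a) := by
            simp [pvG]
          rw [hGapp, hGq, pv_alt_one tree node hpre hqr hL]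
          ring
        | a :: b :: rest =>
          have hca := pv_lookup_kids_one tree hL
          have hcb := pv_lookup_kids_two tree hL
          have hra := pv_rank_lt tree node hpre hqr hca
          have hrb := pv_rank_lt tree node hpre hqr hcb
          have har : a ∈ pvReach tree node := pv_reach_closed tree node hqr hca
          have hbr : b ∈ pvReach tree node := pv_reach_closed tree node hqr hcb
          have hpa : 3 ^ (pvRank tree a + 1) ≤ 3 ^ (pvRank tree q) :=
            Nat.pow_le_pow_right (by omega) (by omega)
          have hpb : 3 ^ (pvRank tree b + 1) ≤ 3 ^ (pvRank tree q) :=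
            Nat.pow_le_pow_right (by omega) (by omega)
          have h3 : 1 ≤ 3 ^ (pvRank tree q) := Nat.one_le_pow _ _ (by omega)
          have hmem'' : ∀ x ∈ qs ++ [a, b], x ∈ pvReach tree node := by
            intro x hx
            rcases List.mem_append.mp hx with hx | hx
            · exact hmem' x hx
            · simp at hx; rcases hx with rfl | rfl; exacts [har, hbr]
          have hS' : pvS tree (qs ++ [a, b]) ≤ fuel := by
            simp only [pvS, List.map_append, List.sum_append, List.map_cons, List.map_nil,
              List.sum_cons, List.sum_nil] at hS hSq ⊢
            omega
          have := ih (qs ++ [a, b]) (total + a + b) hmem'' hS'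
          simp only [pvBfsA, hL, this]
          have hGapp : pvG tree (qs ++ [a, b]) = pvG tree qs
              + (sum_tree_nodes_loop_alt tree a - a) + (sum_tree_nodes_loop_alt tree b - b) := by
            simp [pvG]; ring
          rw [hGapp, hGq, pv_alt_two tree node hpre hqr hL]
          ring

-- ===== VERDICT (by name: the statement is the Claim_ definition above) =====
theorem sum_tree_nodes_loop_spec : Claim_equal_sum_tree_nodes_loop := by
  intro tree node _ hpre
  unfold Spec_sum_tree_nodes_loop sum_tree_nodes_loop
  have hle := pv_rank_le tree node
  have hS : pvS tree [node] ≤ 3 ^ ((pvAllKids tree).length + 1) := by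
    simp only [pvS, List.map_cons, List.map_nil, List.sum_cons, List.sum_nil, Nat.add_zero]
    exact Nat.pow_le_pow_right (by omega) (by omega)
  rw [pv_bfs_inv tree node hpre _ [node] node (by simpa using pv_node_mem_reach tree node) hS]
  simp [pvG]
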